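-- pv_equiv track=rewrite | github.com/zmaing/openhex | src/core/parser/c_struct.py | _split_declarations
-- ===== SOURCE A (Python) =====
-- def _split_declarations(body: str) -> list[str]:
--     """Split the struct body into field declarations."""
--     declarations = []
--     current = []
--     brace_depth = 0
--
--     for char in body:
--         if char == "{":
--             brace_depth += 1
--         elif char == "}":
--             brace_depth = max(0, brace_depth - 1)
--
--         if char == ";" and brace_depth == 0:
--             declaration = "".join(current).strip()
--             current = []
--             if not declaration or declaration.startswith("#pragma"):
--                 continue
--             declarations.append(" ".join(declaration.split()))
--             continue
--
--         current.append(char)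
--
--     declaration = "".join(current).strip()
--     if declaration and not declaration.startswith("#pragma"):
--         declarations.append(" ".join(declaration.split()))
--     return declarations
-- ===== SOURCE B (Python) =====
-- def _split_declarations(body: str) -> list[str]:
--     """Two-pass: cut body into segments at top-level semicolons, then clean each."""
--     segments = []
--     depth = 0
--     start = 0
--     for i, ch in enumerate(body):
--         if ch == "{":
--             depth += 1
--         elif ch == "}":
--             depth = max(0, depth - 1)
--         elif ch == ";" and depth == 0:
--             segments.append(body[start:i])
--             start = i + 1
--     segments.append(body[start:])
--     result = []
--     for seg in segments:
--         s = seg.strip()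
--         if s and not s.startswith("#pragma"):
--             result.append(" ".join(s.split()))
--     return result
-- ===== Notes on version B (the rewrite author's own statement) =====
-- stated objective: alternative
-- what changed: A's single loop that accumulates characters and emits cleaned declarations on the fly is replaced by two distinct passes: an index scan that cuts the body into slice segments at top-level semicolons, then a cleaning pass that strips, filters empty/#pragma segments and normalises whitespace.
import Mathlib
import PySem

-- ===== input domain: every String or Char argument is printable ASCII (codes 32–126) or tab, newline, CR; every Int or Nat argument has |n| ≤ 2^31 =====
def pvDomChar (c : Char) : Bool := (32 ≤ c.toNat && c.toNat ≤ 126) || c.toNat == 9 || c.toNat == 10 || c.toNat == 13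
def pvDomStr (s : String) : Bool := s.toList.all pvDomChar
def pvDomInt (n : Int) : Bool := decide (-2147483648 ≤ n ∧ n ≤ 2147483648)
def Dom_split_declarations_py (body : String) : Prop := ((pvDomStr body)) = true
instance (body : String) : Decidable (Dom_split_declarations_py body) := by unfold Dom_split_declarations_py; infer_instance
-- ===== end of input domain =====

-- B re-decomposes A's single accumulate-and-emit loop into two passes (cut the body into slice
-- segments at top-level semicolons, then clean each segment); objective: alternative decomposition.

-- ===== PORT A =====
def split_declarations_py (body : String) : List String :=
  let st := body.toList.foldl (fun (st : List String × List Char × Int) ch =>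
    let decls := st.1
    let cur := st.2.1
    let depth := st.2.2
    let depth := if ch = '{' then depth + 1
                 else if ch = '}' then max 0 (depth - 1) else depth
    if ch = ';' ∧ depth = 0 then
      let decl := PySem.Chars.strip cur
      if decl = [] ∨ PySem.Chars.startswith decl ("#pragma".toList) then
        (decls, ([] : List Char), depth)
      else
        (decls ++ [String.ofList (PySem.Chars.join [' '] (PySem.Chars.split₀ decl))],
         ([] : List Char), depth)
    else (decls, cur ++ [ch], depth)) ([], [], 0)
  let decl := PySem.Chars.strip st.2.1
  if decl ≠ [] ∧ ¬ PySem.Chars.startswith decl ("#pragma".toList) then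
    st.1 ++ [String.ofList (PySem.Chars.join [' '] (PySem.Chars.split₀ decl))]
  else st.1

-- ===== PORT B =====
def split_declarations_py_alt (body : String) : List String :=
  let full := body.toList
  -- first pass: record the segments between top-level semicolons as slices of the body
  let st := (full.zipIdx 0).foldl
    (fun (st : List (List Char) × Int × Nat) (p : Char × Nat) =>
      let segs := st.1
      let depth := st.2.1
      let start := st.2.2
      if p.1 = '{' then (segs, depth + 1, start)
      else if p.1 = '}' then (segs, max 0 (depth - 1), start)
      else if p.1 = ';' ∧ depth = 0 then
        (segs ++ [PySem.List.slice full (some (start : Int)) (some (p.2 : Int))], depth, p.2 + 1)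
      else (segs, depth, start)) ([], 0, 0)
  let segments := st.1 ++ [PySem.List.slice full (some (st.2.2 : Int)) none]
  -- second pass: clean each segment, dropping empty and '#pragma' ones
  segments.foldl (fun out seg =>
    let s := PySem.Chars.strip seg
    if s ≠ [] ∧ ¬ PySem.Chars.startswith s ("#pragma".toList) then
      out ++ [String.ofList (PySem.Chars.join [' '] (PySem.Chars.split₀ s))]
    else out) []

-- ===== PRECONDITION & SPEC =====
def Spec_split_declarations_py (body : String) (out : List String) : Prop := out = split_declarations_py_alt body
instance (body : String) (out : List String) : Decidable (Spec_split_declarations_py body out) := by unfold Spec_split_declarations_py; infer_instance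

-- ===== CLAIM (what is proved, stated in full; the proofs are below) =====
def Claim_equal_split_declarations_py : Prop := ∀ (body : String), Dom_split_declarations_py body → Spec_split_declarations_py body (split_declarations_py body)

-- ===== LEMMAS AND PROOFS =====

-- proof-side names for the two loop bodies (definitionally equal to the lambdas in the ports)
def pvAStep (st : List String × List Char × Int) (ch : Char) : List String × List Char × Int :=
  let decls := st.1
  let cur := st.2.1
  let depth := st.2.2
  let depth := if ch = '{' then depth + 1
               else if ch = '}' then max 0 (depth - 1) else depth
  if ch = ';' ∧ depth = 0 then
    let decl := PySem.Chars.strip cur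
    if decl = [] ∨ PySem.Chars.startswith decl ("#pragma".toList) then
      (decls, ([] : List Char), depth)
    else
      (decls ++ [String.ofList (PySem.Chars.join [' '] (PySem.Chars.split₀ decl))],
       ([] : List Char), depth)
  else (decls, cur ++ [ch], depth)

def pvEmit (out : List String) (seg : List Char) : List String :=
  let s := PySem.Chars.strip seg
  if s ≠ [] ∧ ¬ PySem.Chars.startswith s ("#pragma".toList) then
    out ++ [String.ofList (PySem.Chars.join [' '] (PySem.Chars.split₀ s))]
  else out

def pvAFinish (st : List String × List Char × Int) : List String := pvEmit st.1 st.2.1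

def pvBStep (full : List Char) (st : List (List Char) × Int × Nat) (p : Char × Nat) :
    List (List Char) × Int × Nat :=
  let segs := st.1
  let depth := st.2.1
  let start := st.2.2
  if p.1 = '{' then (segs, depth + 1, start)
  else if p.1 = '}' then (segs, max 0 (depth - 1), start)
  else if p.1 = ';' ∧ depth = 0 then
    (segs ++ [PySem.List.slice full (some (start : Int)) (some (p.2 : Int))], depth, p.2 + 1)
  else (segs, depth, start)

def pvBFinish (full : List Char) (st : List (List Char) × Int × Nat) : List String :=
  (st.1 ++ [PySem.List.slice full (some (st.2.2 : Int)) none]).foldl pvEmit []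

lemma portA_eq (body : String) :
    split_declarations_py body = pvAFinish (body.toList.foldl pvAStep ([], [], 0)) := rfl

lemma portB_eq (body : String) :
    split_declarations_py_alt body
      = pvBFinish body.toList ((body.toList.zipIdx 0).foldl (pvBStep body.toList) ([], 0, 0)) := rfl

lemma pvAStep_semi (ds : List String) (cur : List Char) (d : Int) (hd : d = 0) :
    pvAStep (ds, cur, d) ';' = (pvEmit ds cur, [], d) := by
  subst hd
  simp only [pvAStep, pvEmit]
  norm_num
  split_ifs with h1 h2 h3 <;> simp_all

lemma pv_loop (full : List Char) :
    ∀ (cs : List Char) (k start : Nat) (depth : Int) (segs : List (List Char)),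
    start ≤ k → cs = full.drop k →
    pvAFinish (cs.foldl pvAStep (segs.foldl pvEmit [], (full.drop start).take (k - start), depth))
      = pvBFinish full ((cs.zipIdx k).foldl (pvBStep full) (segs, depth, start)) := by
  intro cs
  induction cs with
  | nil =>
    intro k start depth segs hsk hdrop
    have hlen : full.length ≤ k := by
      have h := congrArg List.length hdrop
      simp only [List.length_nil, List.length_drop] at h
      omega
    have htake : (full.drop start).take (k - start) = full.drop start :=
      List.take_of_length_le (by simp only [List.length_drop]; omega)
    simp only [List.foldl_nil, List.zipIdx_nil, htake, pvAFinish, pvBFinish]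
    rw [PySem.List.slice_from_natCast, List.foldl_append]
    simp [List.foldl_cons, List.foldl_nil]
  | cons c cs ih =>
    intro k start depth segs hsk hdrop
    have hk : k < full.length := by
      by_contra h
      rw [List.drop_eq_nil_of_le (by omega)] at hdrop
      exact List.cons_ne_nil c cs hdrop
    have hcons := List.drop_eq_getElem_cons hk
    rw [hcons] at hdrop
    have hc : c = full[k] := (List.cons.injEq _ _ _ _ ▸ hdrop).1
    have hcs : cs = full.drop (k + 1) := (List.cons.injEq _ _ _ _ ▸ hdrop).2
    have hcur : (full.drop start).take (k - start) ++ [c]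
        = (full.drop start).take (k + 1 - start) := by
      have hlt : k - start < (full.drop start).length := by
        simp only [List.length_drop]; omega
      have hget : (full.drop start)[k - start]'hlt = full[k] := by
        rw [List.getElem_drop]
        congr 1
        omega
      rw [hc, ← hget, show k + 1 - start = (k - start) + 1 from by omega]
      exact List.take_append_getElem hlt
    rw [List.zipIdx_cons, List.foldl_cons, List.foldl_cons]
    by_cases h1 : c = '{'
    · have hA : pvAStep (segs.foldl pvEmit [], (full.drop start).take (k - start), depth) c
          = (segs.foldl pvEmit [], (full.drop start).take (k + 1 - start), depth + 1) := by
        subst h1; simp [pvAStep, hcur]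
      have hB : pvBStep full (segs, depth, start) (c, k) = (segs, depth + 1, start) := by
        subst h1; simp [pvBStep]
      rw [hA, hB]
      exact ih (k + 1) start (depth + 1) segs (by omega) hcs
    · by_cases h2 : c = '}'
      · have hA : pvAStep (segs.foldl pvEmit [], (full.drop start).take (k - start), depth) c
            = (segs.foldl pvEmit [], (full.drop start).take (k + 1 - start), max 0 (depth - 1)) := by
          subst h2; simp [pvAStep, hcur]
        have hB : pvBStep full (segs, depth, start) (c, k) = (segs, max 0 (depth - 1), start) := by
          subst h2; simp [pvBStep]
        rw [hA, hB]
        exact ih (k + 1) start (max 0 (depth - 1)) segs (by omega) hcs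
      · by_cases h3 : c = ';' ∧ depth = 0
        · obtain ⟨hc', hd⟩ := h3
          have hA : pvAStep (segs.foldl pvEmit [], (full.drop start).take (k - start), depth) c
              = (pvEmit (segs.foldl pvEmit []) ((full.drop start).take (k - start)), [], depth) := by
            subst hc'
            exact pvAStep_semi _ _ _ hd
          have hB : pvBStep full (segs, depth, start) (c, k)
              = (segs ++ [PySem.List.slice full (some (start : Int)) (some (k : Int))], depth, k + 1) := by
            subst hc'; subst hd; simp [pvBStep]
          rw [hA, hB]
          have hslice : PySem.List.slice full (some (start : Int)) (some (k : Int))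
              = (full.drop start).take (k - start) := PySem.List.slice_natCast full start k
          rw [← hslice]
          have := ih (k + 1) (k + 1) depth
            (segs ++ [PySem.List.slice full (some (start : Int)) (some (k : Int))])
            (le_refl _) hcs
          rw [List.foldl_append, List.foldl_cons, List.foldl_nil] at this
          simpa using this
        · have hA : pvAStep (segs.foldl pvEmit [], (full.drop start).take (k - start), depth) c
              = (segs.foldl pvEmit [], (full.drop start).take (k + 1 - start), depth) := by
            simp only [pvAStep, if_neg h1, if_neg h2]
            rw [if_neg h3]
            simp [hcur]
          have hB : pvBStep full (segs, depth, start) (c, k) = (segs, depth, start) := by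
            simp only [pvBStep]
            rw [if_neg h1, if_neg h2, if_neg h3]
          rw [hA, hB]
          exact ih (k + 1) start depth segs (by omega) hcs

-- ===== VERDICT (by name: the statement is the Claim_ definition above) =====
theorem split_declarations_py_spec : Claim_equal_split_declarations_py := by
  intro body _
  unfold Spec_split_declarations_py
  rw [portA_eq, portB_eq]
  have := pv_loop body.toList body.toList 0 0 0 [] (le_refl _) (by simp)
  simpa using this
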